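-- pv_equiv track=rewrite | github.com/oskrim/fromthetransistor | section3/py/asm.py | int_to_imm
-- ===== SOURCE A (Python) =====
-- def parse_int(s):
--   if isinstance(s, int):
--     return s
--   if s[0] == '#':
--     return parse_int(s[1:])
--   elif s[0:2] == '0x':
--     return int(s[2:], 16)
--   else:
--     return int(s)
--
-- def int_to_imm(i):
--   i = parse_int(i)
--   if i < 0:
--     raise Exception('invalid immediate %d' % i)
--   highbits = i >> 8
--   if highbits == 0:
--     return i
--   shift = 0
--   while highbits:
--     highbits >>= 1
--     shift += 1
--   if shift > 15:
--     raise Exception('invalid immediate %d shift %d' % (i, shift))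
--   return (i >> shift) | (shift << 8)
-- ===== SOURCE B (Python) =====
-- def int_to_imm(i):
--   if not isinstance(i, int):
--     t = i.lstrip('#')
--     i = int(t[2:], 16) if t[:2] == '0x' else int(t)
--   if i < 0:
--     raise Exception('invalid immediate %d' % i)
--   for shift in range(16):
--     if (i >> shift) < 256:
--       return (i >> shift) | (shift << 8)
--   raise Exception('invalid immediate %d' % i)
-- ===== Notes on version B (the rewrite author's own statement) =====
-- stated objective: alternative
-- what changed: B replaces A's recursive '#'-stripping with lstrip plus one conditional parse, and replaces A's bit-counting while-loop over highbits by a forward search for the smallest shift in range(16) with (i >> shift) < 256, which also subsumes A's highbits==0 early return and the shift>15 check.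
import Mathlib
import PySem

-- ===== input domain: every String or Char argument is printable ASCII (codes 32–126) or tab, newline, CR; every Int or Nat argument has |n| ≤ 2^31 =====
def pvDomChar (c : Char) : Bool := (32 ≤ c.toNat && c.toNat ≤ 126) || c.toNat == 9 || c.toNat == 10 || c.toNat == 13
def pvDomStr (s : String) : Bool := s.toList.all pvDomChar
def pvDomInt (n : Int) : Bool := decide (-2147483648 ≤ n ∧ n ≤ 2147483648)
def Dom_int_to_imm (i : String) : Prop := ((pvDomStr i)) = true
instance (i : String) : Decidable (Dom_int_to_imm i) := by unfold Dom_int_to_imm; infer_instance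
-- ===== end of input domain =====

-- B parses with lstrip('#') instead of recursion and finds the shift by searching
-- the smallest shift in range(16) with (i >> shift) < 256, instead of counting the
-- bits of i >> 8 in a while-loop; objective: alternative (same cost).

-- ===== PORT A =====
-- A's recursive parse_int (string argument, so the isinstance branch never fires);
-- none = the exceptions int() / s[0] raise.
def parse_int : List Char → Option Int
  | [] => none                                     -- s[0] raises IndexError
  | c :: rest =>
    if c = '#' then parse_int rest                 -- s[1:]
    else if (c :: rest).take 2 = ['0', 'x'] then PySem.Int.ofCharsBase? ((c :: rest).drop 2) 16
    else PySem.Int.ofChars? (c :: rest)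

-- A's while-loop; called with the (nonnegative) highbits held as a Nat so the
-- recursion terminates; n >>> 1 on a nonnegative value is n / 2 (exact).
def countShift (n : Nat) (shift : Nat) : Nat :=
  if n = 0 then shift else countShift (n / 2) (shift + 1)

def int_to_imm (i : String) : Int :=
  match parse_int i.toList with
  | none => 0                                      -- parse raised: outside Pre_
  | some v =>
    if v < 0 then 0                                -- raise: outside Pre_
    else
      let highbits := v >>> (8:Nat)
      if highbits = 0 then v
      else
        let shift := countShift highbits.toNat 0
        if shift > 15 then 0                       -- raise: outside Pre_
        else PySem.Int.bor (v >>> shift) ((shift : Int) <<< 8)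

-- ===== PORT B =====
-- Source B's 'for shift in range(16)' loop: first shift with (v >> shift) < 256 wins;
-- falling off the loop is the raise (outside Pre_).
def findShiftLoop (v : Int) (shift : Nat) : Int :=
  if h : 16 ≤ shift then 0                         -- loop exhausted: raise, outside Pre_
  else if v >>> shift < 256 then PySem.Int.bor (v >>> shift) ((shift : Int) <<< 8)
  else findShiftLoop v (shift + 1)
termination_by 16 - shift

def int_to_imm_alt (i : String) : Int :=
  let t := i.toList.dropWhile (· == '#')           -- i.lstrip('#')
  match (if t.take 2 = ['0', 'x'] then PySem.Int.ofCharsBase? (t.drop 2) 16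
         else PySem.Int.ofChars? t) with
  | none => 0                                      -- int() raised: outside Pre_
  | some v =>
    if v < 0 then 0                                -- raise: outside Pre_
    else findShiftLoop v 0

-- ===== PRECONDITION & SPEC =====
-- closed-form value of the string: drop the leading '#'s, then read it as hex
-- (with a '0x' prefix) or decimal; none where Python's parse raises
def immVal (i : String) : Option Int :=
  let t := i.toList.dropWhile (· == '#')
  if t = [] then none
  else if t.take 2 = ['0', 'x'] then PySem.Int.ofCharsBase? (t.drop 2) 16
  else PySem.Int.ofChars? t

-- A raises (and both ports return the dummy 0) unless the string parses and the
-- value lies in [0, 2^23) (i.e. shift ≤ 15); Pre_ admits exactly A's normal returns.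
def Pre_int_to_imm (i : String) : Prop :=
  (immVal i).isSome = true ∧ 0 ≤ (immVal i).getD 0 ∧ (immVal i).getD 0 < 8388608
instance (i : String) : Decidable (Pre_int_to_imm i) := by unfold Pre_int_to_imm; infer_instance

def pvWitness_int_to_imm : String := "#0x1ff"

def Spec_int_to_imm (i : String) (out : Int) : Prop := out = int_to_imm_alt i
instance (i : String) (out : Int) : Decidable (Spec_int_to_imm i out) := by unfold Spec_int_to_imm; infer_instance

-- ===== CLAIM (what is proved, stated in full; the proofs are below) =====
def Claim_equal_int_to_imm : Prop := ∀ (i : String), Dom_int_to_imm i → Pre_int_to_imm i → Spec_int_to_imm i (int_to_imm i)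

-- ===== LEMMAS AND PROOFS =====

-- the recursive '#'-strip is the dropWhile of the closed-form value
theorem parse_int_eq_immVal (cs : List Char) :
    parse_int cs =
      (let t := cs.dropWhile (· == '#')
       if t = [] then none
       else if t.take 2 = ['0', 'x'] then PySem.Int.ofCharsBase? (t.drop 2) 16
       else PySem.Int.ofChars? t) := by
  induction cs with
  | nil => rfl
  | cons c rest ih =>
    by_cases hc : c = '#'
    · simpa [parse_int, hc] using ih
    · simp [parse_int, hc]

-- A's while-loop counts exactly bit_length
theorem countShift_eq (n : Nat) : ∀ s, countShift n s = PySem.Int.bitLength (n : Int) + s := by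
  induction n using Nat.strong_induction_on with
  | _ n ih =>
    intro s
    unfold countShift
    by_cases h : n = 0
    · simp [h, PySem.Int.bitLength_zero]
    · rw [if_neg h, ih (n / 2) (Nat.div_lt_self (Nat.pos_of_ne_zero h) one_lt_two),
        PySem.Int.bitLength_natCast (Nat.pos_of_ne_zero h)]
      omega

theorem bitLength_shift_le (v : Int) (h0 : 0 ≤ v) (hlt : v < 8388608) :
    PySem.Int.bitLength (v >>> (8:Nat)) ≤ 15 := by
  by_contra h
  have h2 : 2 ^ (PySem.Int.bitLength (v >>> (8:Nat)) - 1) ≤ (v >>> (8:Nat)).natAbs := by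
    apply PySem.Int.two_pow_bitLength_le
    intro hz
    simp [hz, PySem.Int.bitLength_zero] at h
  have h3 : (2:Nat) ^ 15 ≤ 2 ^ (PySem.Int.bitLength (v >>> (8:Nat)) - 1) :=
    Nat.pow_le_pow_right (by norm_num) (by omega)
  have hv : v >>> (8:Nat) = v / 256 := by
    rw [Int.shiftRight_eq_div_pow]; norm_num
  have hub : (v >>> (8:Nat)).natAbs < 32768 := by
    rw [hv]
    have : v / 256 < 32768 := by omega
    have h0' : 0 ≤ v / 256 := Int.ediv_nonneg h0 (by norm_num)
    omega
  omega

-- B's search, run from any s ≤ k below the minimal admissible shift k, stops at k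
theorem findShiftLoop_eq (v : Int) (k : Nat) (hk : k ≤ 15) (hlt : v >>> k < 256)
    (hge : ∀ j, j < k → 256 ≤ v >>> j) :
    ∀ s, s ≤ k → findShiftLoop v s = PySem.Int.bor (v >>> k) ((k : Int) <<< 8) := by
  have H : ∀ d s, s ≤ k → k - s = d →
      findShiftLoop v s = PySem.Int.bor (v >>> k) ((k : Int) <<< 8) := by
    intro d
    induction d with
    | zero =>
      intro s hs hd
      have : s = k := by omega
      subst this
      unfold findShiftLoop
      rw [dif_neg (by omega), if_pos hlt]
    | succ n ih =>
      intro s hs hd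
      unfold findShiftLoop
      rw [dif_neg (by omega), if_neg (not_lt.mpr (hge s (by omega)))]
      exact ih (s + 1) (by omega) (by omega)
  intro s hs
  exact H (k - s) s hs rfl

-- shift characterization: with k = bit_length (v >> 8), v >> k < 256 …
theorem shift_upper (v : Int) (h0 : 0 ≤ v) :
    v >>> (PySem.Int.bitLength (v >>> (8:Nat))) < 256 := by
  set k := PySem.Int.bitLength (v >>> (8:Nat)) with hkdef
  have hv8 : v >>> (8:Nat) = v / 256 := by rw [Int.shiftRight_eq_div_pow]; norm_num
  have hub : (v >>> (8:Nat)).natAbs < 2 ^ k := PySem.Int.lt_two_pow_bitLength _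
  have h0' : 0 ≤ v / 256 := Int.ediv_nonneg h0 (by norm_num)
  have hdiv : v / 256 < (2 ^ k : Nat) := by
    rw [hv8] at hub; omega
  have hvlt : v < 256 * (2:Int) ^ k := by
    have := (Int.ediv_lt_iff_lt_mul (a := v) (b := ((2:Int) ^ k)) (by norm_num : (0:Int) < 256)).mp
      (by push_cast at hdiv ⊢; exact hdiv)
    linarith
  rw [Int.shiftRight_eq_div_pow, show (((2:Nat) ^ k : Nat) : Int) = (2:Int) ^ k by push_cast; ring]
  have hp : (0:Int) < 2 ^ k := by positivity
  rw [Int.ediv_lt_iff_lt_mul hp]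
  linarith
-- … and v >> j ≥ 256 for every j < k
theorem shift_lower (v : Int) (h0 : 0 ≤ v) (hnz : v >>> (8:Nat) ≠ 0) :
    ∀ j, j < PySem.Int.bitLength (v >>> (8:Nat)) → 256 ≤ v >>> j := by
  intro j hj
  set k := PySem.Int.bitLength (v >>> (8:Nat)) with hkdef
  have hv8 : v >>> (8:Nat) = v / 256 := by rw [Int.shiftRight_eq_div_pow]; norm_num
  have hlb : 2 ^ (k - 1) ≤ (v >>> (8:Nat)).natAbs := PySem.Int.two_pow_bitLength_le _ hnz
  have h0' : 0 ≤ v / 256 := Int.ediv_nonneg h0 (by norm_num)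
  have hdiv : ((2:Int) ^ (k - 1)) ≤ v / 256 := by
    rw [hv8] at hlb
    have h1 : ((2 ^ (k - 1) : Nat) : Int) ≤ (((v / 256).natAbs : Nat) : Int) := by exact_mod_cast hlb
    rw [Int.natAbs_of_nonneg h0'] at h1
    push_cast at h1
    exact h1
  have hvge : 256 * (2:Int) ^ (k - 1) ≤ v := by
    have := (Int.le_ediv_iff_mul_le (by norm_num : (0:Int) < 256)).mp hdiv
    linarith
  rw [Int.shiftRight_eq_div_pow, show (((2:Nat) ^ j : Nat) : Int) = (2:Int) ^ j by push_cast; ring]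
  rw [Int.le_ediv_iff_mul_le (by positivity : (0:Int) < 2 ^ j)]
  have hmon : (2:Int) ^ j ≤ 2 ^ (k - 1) := by
    apply pow_le_pow_right₀ (by norm_num)
    omega
  linarith

theorem int_to_imm_eq_alt (i : String) (h : Pre_int_to_imm i) :
    int_to_imm i = int_to_imm_alt i := by
  obtain ⟨hs, h0, hlt⟩ := h
  have hpv : parse_int i.toList = immVal i := by
    rw [parse_int_eq_immVal]; rfl
  cases hp : immVal i with
  | none => simp [hp] at hs
  | some v =>
    rw [hp] at h0 hlt
    simp only [Option.getD_some] at h0 hlt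
    -- B's inline parse agrees with immVal on its some-branch (immVal's extra
    -- t = [] test returns none, so hp forces t ≠ [] and the branches coincide)
    have hbv : (if (i.toList.dropWhile (· == '#')).take 2 = ['0', 'x']
          then PySem.Int.ofCharsBase? ((i.toList.dropWhile (· == '#')).drop 2) 16
          else PySem.Int.ofChars? (i.toList.dropWhile (· == '#'))) = some v := by
      unfold immVal at hp
      by_cases ht : i.toList.dropWhile (· == '#') = []
      · simp [ht] at hp
      · simpa [ht] using hp
    have halt : int_to_imm_alt i = if v < 0 then 0 else findShiftLoop v 0 := by
      simp only [int_to_imm_alt]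
      rw [hbv]
    unfold int_to_imm
    rw [hpv, hp, halt]
    simp only [if_neg (not_lt.mpr h0)]
    set k := PySem.Int.bitLength (v >>> (8:Nat)) with hkdef
    have hkle : k ≤ 15 := bitLength_shift_le v h0 hlt
    have hup : v >>> k < 256 := shift_upper v h0
    by_cases hz : v >>> (8:Nat) = 0
    · -- highbits == 0: A returns v; B's search stops at shift 0 with v | 0 = v
      have hk0 : k = 0 := by rw [hkdef, hz, PySem.Int.bitLength_zero]
      have := findShiftLoop_eq v k hkle hup (by omega) 0 (by omega)
      rw [if_pos hz, this, hk0]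
      simp
    · have hlo := shift_lower v h0 hz
      have hcs : countShift (v >>> (8:Nat)).toNat 0 = k := by
        have hnn : 0 ≤ v >>> (8:Nat) := by
          rw [Int.shiftRight_eq_div_pow]; exact Int.ediv_nonneg h0 (by positivity)
        rw [countShift_eq, Int.toNat_of_nonneg hnn]
        omega
      rw [if_neg hz, hcs, if_neg (by omega),
        findShiftLoop_eq v k hkle hup hlo 0 (by omega)]

-- ===== VERDICT (by name: the statement is the Claim_ definition above) =====
theorem int_to_imm_spec : Claim_equal_int_to_imm := by
  intro i _ hpre
  exact int_to_imm_eq_alt i hpre
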